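-- pv_equiv track=rewrite | github.com/EricR/cryptopals | challenge_06.py | transpose_blocks
-- ===== SOURCE A (Python) =====
-- def to_blocks(list1, size):
--     return [list1[i:i + size] for i in range(0, len(list1), size)]
--
-- def transpose_blocks(bytes1, size):
--     """
--     Returns a transposed version of given bytes.
--     """
--     blocks = []
--
--     for i in range(size):
--         new_block = []
--         for block in to_blocks(bytes1, size):
--             if i < len(block):
--                 new_block.append(block[i])
--         blocks.append(new_block)
--
--     return blocks
-- ===== SOURCE B (Python) =====
-- def transpose_blocks(bytes1, size):
--     """
--     Returns a transposed version of given bytes.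
--     """
--     blocks = [[] for _ in range(size)]
--     if blocks:
--         for i, b in enumerate(bytes1):
--             blocks[i % size].append(b)
--     return blocks
-- ===== Notes on version B (the rewrite author's own statement) =====
-- stated objective: faster
-- what changed: Replaces the size passes that each re-chunk the whole input (to_blocks inside a loop over range(size)) with one pass over the bytes that appends each byte to bucket i % size.
import Mathlib
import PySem

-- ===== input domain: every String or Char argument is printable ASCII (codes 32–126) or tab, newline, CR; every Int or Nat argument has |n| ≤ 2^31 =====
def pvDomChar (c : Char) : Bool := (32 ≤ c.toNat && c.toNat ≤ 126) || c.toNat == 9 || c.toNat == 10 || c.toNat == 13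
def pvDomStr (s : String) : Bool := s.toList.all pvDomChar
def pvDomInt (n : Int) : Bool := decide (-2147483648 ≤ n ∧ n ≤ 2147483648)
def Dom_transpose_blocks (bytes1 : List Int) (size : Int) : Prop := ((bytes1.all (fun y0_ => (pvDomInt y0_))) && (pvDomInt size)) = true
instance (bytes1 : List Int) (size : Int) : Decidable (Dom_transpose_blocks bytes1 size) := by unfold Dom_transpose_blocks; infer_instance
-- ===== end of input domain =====

-- B replaces A's size passes that each re-chunk the whole input with a single pass
-- appending each byte to bucket i % size (objective: faster, asymptotic O(n+size) vs O(size*n)).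


-- ===== PORT A =====
def to_blocks_A (list1 : List Int) (size : Int) : List (List Int) :=
  (PySem.List.pyRange 0 (list1.length : Int) size).map
    (fun i => PySem.List.slice list1 (some i) (some (i + size)))

def transpose_blocks (bytes1 : List Int) (size : Int) : List (List Int) :=
  (PySem.List.pyRange 0 size 1).foldl
    (fun blocks i =>
      blocks ++ [(to_blocks_A bytes1 size).foldl
        (fun nb block =>
          if i < (block.length : Int) then nb ++ (PySem.List.pyGet? block i).toList else nb) []])
    []

-- ===== PORT B =====
def transpose_blocks_alt (bytes1 : List Int) (size : Int) : List (List Int) :=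
  let blocks := (PySem.List.pyRange 0 size 1).map (fun _ => ([] : List Int))
  if blocks = [] then blocks
  else
    (PySem.List.enumerate bytes1).foldl
      (fun bl ib => bl.modify (PySem.Int.mod ib.1 size).toNat (fun bucket => bucket ++ [ib.2]))
      blocks

-- ===== PRECONDITION & SPEC =====
def Spec_transpose_blocks (bytes1 : List Int) (size : Int) (out : List (List Int)) : Prop := out = transpose_blocks_alt bytes1 size
instance (bytes1 : List Int) (size : Int) (out : List (List Int)) : Decidable (Spec_transpose_blocks bytes1 size out) := by unfold Spec_transpose_blocks; infer_instance

-- ===== CLAIM (what is proved, stated in full; the proofs are below) =====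
def Claim_equal_transpose_blocks : Prop := ∀ (bytes1 : List Int) (size : Int), Dom_transpose_blocks bytes1 size → Spec_transpose_blocks bytes1 size (transpose_blocks bytes1 size)

-- ===== LEMMAS AND PROOFS =====

/-- `sel s j xs off` = elements of `xs` at absolute positions ≡ j (mod s), first element at position `off`. -/
def sel (s j : Nat) : List Int → Nat → List Int
  | [], _ => []
  | x :: xs, off => (if off % s = j then [x] else []) ++ sel s j xs (off + 1)

theorem sel_append (s j : Nat) (ys zs : List Int) :
    ∀ off, sel s j (ys ++ zs) off = sel s j ys off ++ sel s j zs (off + ys.length) := by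
  induction ys with
  | nil => intro off; simp [sel]
  | cons y ys ih =>
      intro off
      simp only [List.cons_append, sel, ih (off + 1), List.length_cons, List.append_assoc]
      ring_nf

theorem sel_shift (s j : Nat) (xs : List Int) :
    ∀ off, sel s j xs (off + s) = sel s j xs off := by
  induction xs with
  | nil => intro off; simp [sel]
  | cons x xs ih =>
      intro off
      simp only [sel, Nat.add_mod_right]
      rw [show off + s + 1 = (off + 1) + s by omega, ih (off + 1)]

theorem sel_empty_of_gt (s j : Nat) :
    ∀ (c : List Int) (off : Nat), j < off → off + c.length ≤ s → sel s j c off = [] := by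
  intro c
  induction c with
  | nil => intro off _ _; rfl
  | cons x c ih =>
      intro off hj hc
      simp only [List.length_cons] at hc
      have hoffs : off < s := by omega
      have : off % s = off := Nat.mod_eq_of_lt hoffs
      simp only [sel, this, if_neg (by omega : ¬ off = j), List.nil_append]
      exact ih (off + 1) (by omega) (by omega)

theorem sel_take (s j : Nat) (hj : j < s) :
    ∀ (c : List Int) (off : Nat), off ≤ j → off + c.length ≤ s →
      sel s j c off = (getElem? c (j - off)).toList := by
  intro c
  induction c with
  | nil => intro off _ _; simp [sel]
  | cons x c ih =>
      intro off hoj hc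
      simp only [List.length_cons] at hc
      have hoffs : off < s := by omega
      have hmod : off % s = off := Nat.mod_eq_of_lt hoffs
      by_cases h : off = j
      · subst h
        have h0 : sel s off c (off + 1) = [] := sel_empty_of_gt s off c (off + 1) (by omega) (by omega)
        simp [sel, hmod, h0]
      · have hlt : off < j := by omega
        obtain ⟨d, hd⟩ : ∃ d, j - off = d + 1 := ⟨j - off - 1, by omega⟩
        simp only [sel, hmod, if_neg h, List.nil_append, hd, List.getElem?_cons_succ]
        rw [ih (off + 1) (by omega) (by omega), show j - (off + 1) = d by omega]

theorem chunk_flat (s j : Nat) (_hs : 0 < s) (hj : j < s) :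
    ∀ (m : Nat) (xs : List Int), xs.length ≤ m * s →
      ((List.range m).map (fun k => (xs.drop (s * k)).take s)).flatMap
          (fun b => (getElem? b j).toList)
        = sel s j xs 0 := by
  intro m
  induction m with
  | zero =>
      intro xs hlen
      have : xs = [] := List.eq_nil_of_length_eq_zero (by omega)
      subst this; rfl
  | succ m ih =>
      intro xs hlen
      rw [List.range_succ_eq_map]
      simp only [List.map_cons, List.map_map, List.flatMap_cons, Nat.mul_zero, List.drop_zero]
      have hrest : (List.range m).map ((fun k => (xs.drop (s * k)).take s) ∘ Nat.succ)
          = (List.range m).map (fun k => ((xs.drop s).drop (s * k)).take s) := by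
        apply List.map_congr_left
        intro k _
        simp only [Function.comp_apply, List.drop_drop]
        rw [show s + s * k = s * Nat.succ k by simp [Nat.succ_eq_add_one]; ring]
      rw [hrest, ih (xs.drop s) (by have h : (m + 1) * s = m * s + s := by ring
                                    simp only [List.length_drop]; omega)]
      by_cases hxl : s ≤ xs.length
      · conv_rhs => rw [show xs = xs.take s ++ xs.drop s from (List.take_append_drop s xs).symm]
        rw [sel_append, List.length_take, Nat.min_eq_left hxl, Nat.zero_add,
          show sel s j (xs.drop s) s = sel s j (xs.drop s) 0 by
            simpa using sel_shift s j (xs.drop s) 0,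
          sel_take s j hj (xs.take s) 0 (Nat.zero_le j)
            (by simp [Nat.min_eq_left hxl]), Nat.sub_zero]
      · have hdrop : xs.drop s = [] := List.drop_eq_nil_of_le (by omega)
        have htake : xs.take s = xs := List.take_of_length_le (by omega)
        rw [hdrop, htake,
          sel_take s j hj xs 0 (Nat.zero_le j) (by omega), Nat.sub_zero]
        simp [sel]

theorem B_loop (s : Nat) (xs : List Int) :
    ∀ (k : Nat) (bl : List (List Int)),
      (PySem.List.enumerate xs (k : Int)).foldl
          (fun bl ib => bl.modify (PySem.Int.mod ib.1 (s : Int)).toNat (fun bucket => bucket ++ [ib.2])) bl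
        = bl.mapIdx (fun j b => b ++ sel s j xs k) := by
  induction xs with
  | nil =>
      intro k bl
      simp only [PySem.List.enumerate_nil, List.foldl_nil, sel, List.append_nil]
      apply List.ext_getElem (by simp)
      intro i h1 h2
      simp [List.getElem_mapIdx]
  | cons x xs ih =>
      intro k bl
      rw [PySem.List.enumerate_cons, List.foldl_cons,
        show ((k : Int) + 1) = ((k + 1 : Nat) : Int) by push_cast; ring, ih (k + 1)]
      apply List.ext_getElem (by simp [List.length_modify])
      intro i h1 h2
      simp only [List.getElem_mapIdx, PySem.Int.mod_natCast, Int.toNat_natCast,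
        List.getElem_modify, sel]
      split_ifs with h
      · simp [List.append_assoc]
      · simp

theorem transpose_blocks_eq_of_pos (bytes1 : List Int) (s : Nat) (hs : 0 < s) :
    transpose_blocks bytes1 (s : Int) = (List.range s).map (fun j => sel s j bytes1 0) := by
  unfold transpose_blocks
  rw [PySem.List.foldl_append_singleton_eq_map, List.nil_append,
    PySem.List.pyRange_one 0 (s : Int)]
  simp only [Int.sub_zero, Int.toNat_natCast, List.map_map]
  apply List.map_congr_left
  intro j hj
  rw [List.mem_range] at hj
  simp only [Function.comp_apply, Int.zero_add]
  -- the inner loop is a flatMap of optional lookups over the chunk list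
  have hbody : (fun (nb : List Int) (block : List Int) =>
        if (j : Int) < (block.length : Int) then nb ++ (PySem.List.pyGet? block (j : Int)).toList else nb)
      = fun nb block => nb ++ (getElem? block j).toList := by
    funext nb block
    by_cases h : j < block.length
    · rw [if_pos (by exact_mod_cast h)]
      simp
    · rw [if_neg (by exact_mod_cast h), List.getElem?_eq_none (by omega)]
      simp
  rw [hbody, PySem.List.foldl_append_eq_flatMap, List.nil_append]
  -- the chunk list is (range m).map of take/drop chunks
  set n := bytes1.length with hn
  set m := (if (0 : Int) < (n : Int) then (((n : Int) - 0 + (s : Int) - 1) / (s : Int)).toNat else 0) with hm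
  have hblocks : to_blocks_A bytes1 (s : Int)
      = (List.range m).map (fun k => (bytes1.drop (s * k)).take s) := by
    unfold to_blocks_A
    rw [PySem.List.pyRange_of_pos 0 (n : Int) (by exact_mod_cast hs)]
    rw [List.map_map]
    apply List.map_congr_left
    intro k _
    simp only [Function.comp_apply, Int.zero_add]
    rw [show ((s : Int) * (k : Nat)) = ((s * k : Nat) : Int) by push_cast; ring,
      PySem.List.slice_natCast_add]
  have hle : n ≤ m * s := by
    by_cases hn0 : 0 < n
    · rw [hm, if_pos (by exact_mod_cast hn0)]
      have hcast : ((n : Int) - 0 + (s : Int) - 1) = ((n + s - 1 : Nat) : Int) := by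
        push_cast [Nat.cast_sub (by omega : 1 ≤ n + s)]; ring
      rw [hcast, ← Int.natCast_div, Int.toNat_natCast]
      have h1 : n + s - 1 < s * ((n + s - 1) / s + 1) := Nat.lt_mul_div_succ _ hs
      have h2 : s * ((n + s - 1) / s + 1) = s * ((n + s - 1) / s) + s := by ring
      have h3 : ((n + s - 1) / s) * s = s * ((n + s - 1) / s) := Nat.mul_comm _ _
      omega
    · omega
  rw [hblocks, chunk_flat s j hs hj m bytes1 hle]

theorem transpose_blocks_alt_eq_of_pos (bytes1 : List Int) (s : Nat) (hs : 0 < s) :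
    transpose_blocks_alt bytes1 (s : Int) = (List.range s).map (fun j => sel s j bytes1 0) := by
  unfold transpose_blocks_alt
  have hlen : ((PySem.List.pyRange 0 (s : Int) 1).map (fun _ => ([] : List Int))).length = s := by
    simp [PySem.List.length_pyRange_one]
  rw [if_neg (by intro h; rw [h] at hlen; simp at hlen; omega)]
  rw [show (0 : Int) = ((0 : Nat) : Int) by norm_num, B_loop s bytes1 0]
  apply List.ext_getElem (by simp [List.length_mapIdx])
  intro i h1 h2
  simp only [List.getElem_mapIdx, List.getElem_map, List.getElem_range, List.nil_append]

-- ===== VERDICT (by name: the statement is the Claim_ definition above) =====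
theorem transpose_blocks_spec : Claim_equal_transpose_blocks := by
  intro bytes1 size _
  unfold Spec_transpose_blocks
  by_cases hpos : 0 < size
  · lift size to Nat using le_of_lt hpos with s
    have hs : 0 < s := by exact_mod_cast hpos
    rw [transpose_blocks_eq_of_pos bytes1 s hs, transpose_blocks_alt_eq_of_pos bytes1 s hs]
  · have hnil : PySem.List.pyRange 0 size 1 = [] :=
      PySem.List.pyRange_one_eq_nil (by omega)
    simp [transpose_blocks, transpose_blocks_alt, hnil]
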